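-- pv_equiv track=rewrite | github.com/josephmate/AdventOfCode2018 | 11/chronal_charge.py | computeTotalPower
-- ===== SOURCE A (Python) =====
-- def computeTotalPower(grid, size):
--     totalPowerGrid = []
--     for y in range(0, 300-size):
--         xs = []
--         for x in range(0, 300-size):
--             totalPower = 0
--             for yincement in range(0, size):
--                 for xincement in range(0, size):
--                     totalPower += grid[y+yincement][x+xincement]
--             xs.append(totalPower)
--         totalPowerGrid.append(xs)
--     return totalPowerGrid
-- ===== SOURCE B (Python) =====
-- def computeTotalPower(grid, size):
--     n = 300 - size
--     if n <= 0:
--         return []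
--     if size <= 0:
--         # every window is empty, so every sum is 0; no cell is ever read
--         return [[0] * n for _ in range(n)]
--     m = n + size - 1  # = 299: last row/column index any window touches, plus nothing
--     # summed-area table: P[y][x] = sum of grid[j][i] for j < y, i < x
--     prev = [0] * (m + 1)
--     P = [prev]
--     for y in range(m):
--         row = grid[y]
--         cur = [0]
--         for x in range(m):
--             cur.append(row[x] + prev[x + 1] + cur[x] - prev[x])
--         P.append(cur)
--         prev = cur
--     return [[P[y + size][x + size] - P[y][x + size] - P[y + size][x] + P[y][x]
--              for x in range(n)] for y in range(n)]
-- ===== Notes on version B (the rewrite author's own statement) =====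
-- stated objective: faster
-- what changed: B builds a 300x300 summed-area table (2D prefix sums) once and answers each window as a 4-corner difference in O(1), instead of A's rescan of all size*size cells per window.
import Mathlib
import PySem

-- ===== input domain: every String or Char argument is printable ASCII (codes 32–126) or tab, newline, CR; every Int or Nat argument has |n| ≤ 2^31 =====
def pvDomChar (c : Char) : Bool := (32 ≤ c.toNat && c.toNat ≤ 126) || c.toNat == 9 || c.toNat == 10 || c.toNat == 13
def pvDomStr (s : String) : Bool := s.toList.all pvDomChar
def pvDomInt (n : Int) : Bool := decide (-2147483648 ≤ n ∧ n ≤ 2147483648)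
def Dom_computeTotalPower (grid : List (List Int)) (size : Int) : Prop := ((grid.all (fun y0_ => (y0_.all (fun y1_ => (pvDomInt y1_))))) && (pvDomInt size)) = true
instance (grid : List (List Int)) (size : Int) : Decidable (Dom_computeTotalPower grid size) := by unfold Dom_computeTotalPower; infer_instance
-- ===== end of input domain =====

-- B replaces A's per-window rescan (size² adds per window) by a summed-area table
-- (2D prefix sums), answering every window in O(1): asymptotically faster.

-- ===== PORT A =====
def computeTotalPower (grid : List (List Int)) (size : Int) : List (List Int) :=
  (PySem.List.pyRange 0 (300 - size) 1).foldl (fun totalPowerGrid y =>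
    totalPowerGrid ++ [
      (PySem.List.pyRange 0 (300 - size) 1).foldl (fun xs x =>
        xs ++ [
          (PySem.List.pyRange 0 size 1).foldl (fun totalPower yincement =>
            (PySem.List.pyRange 0 size 1).foldl (fun totalPower xincement =>
              totalPower + PySem.List.pyGetD (PySem.List.pyGetD grid (y + yincement) []) (x + xincement) 0)
              totalPower) 0]) []]) []

-- ===== PORT B =====
-- one row of the summed-area table from the previous row (Source B's inner loop)
def pvSATRow (row prev : List Int) (m : Int) : List Int :=
  (PySem.List.pyRange 0 m 1).foldl (fun cur x =>
    cur ++ [PySem.List.pyGetD row x 0 + PySem.List.pyGetD prev (x + 1) 0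
            + PySem.List.pyGetD cur x 0 - PySem.List.pyGetD prev x 0]) [0]

-- the summed-area table P (Source B's outer loop); state = (P, prev)
def pvSAT (grid : List (List Int)) (m : Int) : List (List Int) :=
  ((PySem.List.pyRange 0 m 1).foldl (fun (st : List (List Int) × List Int) y =>
      let cur := pvSATRow (PySem.List.pyGetD grid y []) st.2 m
      (st.1 ++ [cur], cur))
    ([List.replicate (m + 1).toNat 0], List.replicate (m + 1).toNat 0)).1

def computeTotalPower_alt (grid : List (List Int)) (size : Int) : List (List Int) :=
  let n := 300 - size
  if n ≤ 0 then []
  else if size ≤ 0 then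
    (PySem.List.pyRange 0 n 1).map (fun _ => List.replicate n.toNat 0)
  else
    let m := n + size - 1
    let P := pvSAT grid m
    (PySem.List.pyRange 0 n 1).map (fun y =>
      (PySem.List.pyRange 0 n 1).map (fun x =>
        PySem.List.pyGetD (PySem.List.pyGetD P (y + size) []) (x + size) 0
        - PySem.List.pyGetD (PySem.List.pyGetD P y []) (x + size) 0
        - PySem.List.pyGetD (PySem.List.pyGetD P (y + size) []) x 0
        + PySem.List.pyGetD (PySem.List.pyGetD P y []) x 0))

-- ===== PRECONDITION & SPEC =====
-- Pre_ excludes exactly the inputs on which A raises IndexError: 1 ≤ size < 300 with a grid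
-- smaller than the hard-coded 300×300 board.
def Pre_computeTotalPower (grid : List (List Int)) (size : Int) : Prop :=
  1 ≤ size ∧ size < 300 → 299 ≤ grid.length ∧ ∀ row ∈ grid.take 299, 299 ≤ row.length
instance (grid : List (List Int)) (size : Int) : Decidable (Pre_computeTotalPower grid size) := by
  unfold Pre_computeTotalPower; infer_instance

def pvWitness_computeTotalPower : List (List Int) × Int := (([] : List (List Int)), 300)

def Spec_computeTotalPower (grid : List (List Int)) (size : Int) (out : List (List Int)) : Prop := out = computeTotalPower_alt grid size
instance (grid : List (List Int)) (size : Int) (out : List (List Int)) : Decidable (Spec_computeTotalPower grid size out) := by unfold Spec_computeTotalPower; infer_instance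

-- ===== CLAIM (what is proved, stated in full; the proofs are below) =====
def Claim_equal_computeTotalPower : Prop := ∀ (grid : List (List Int)) (size : Int), Dom_computeTotalPower grid size → Pre_computeTotalPower grid size → Spec_computeTotalPower grid size (computeTotalPower grid size)

-- ===== LEMMAS AND PROOFS =====

-- the grid entry read as grid[j][i] (0 where out of range; in range under Pre_)
def pvG (grid : List (List Int)) (j i : Nat) : Int := (grid.getD j []).getD i 0

-- 2D prefix sum of pvG
def pvS (grid : List (List Int)) (y x : Nat) : Int :=
  ∑ j ∈ Finset.range y, ∑ i ∈ Finset.range x, pvG grid j i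

-- row y of the ideal summed-area table, width M+1
def pvRowL (grid : List (List Int)) (y M : Nat) : List Int :=
  (List.range (M + 1)).map (fun x => pvS grid y x)

lemma pv_list_sum_range (n : Nat) (f : Nat → Int) :
    ((List.range n).map f).sum = ∑ i ∈ Finset.range n, f i := rfl

lemma pvRowL_zero (grid : List (List Int)) (M : Nat) :
    pvRowL grid 0 M = List.replicate (M + 1) 0 := by
  simp [pvRowL, pvS]

lemma pvS_succ_row (grid : List (List Int)) (y x : Nat) :
    pvS grid (y + 1) x = pvS grid y x + ∑ i ∈ Finset.range x, pvG grid y i := by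
  simp [pvS, Finset.sum_range_succ]

-- invariant of Source B's inner loop: after k steps cur is the prefix of row y+1 of the table
lemma pvSATRow_inv (grid : List (List Int)) (M yy : Nat) :
    ∀ k : Nat, k ≤ M →
    (PySem.List.pyRange 0 (k : Int) 1).foldl
      (fun cur x => cur ++ [PySem.List.pyGetD (grid.getD yy []) x 0
          + PySem.List.pyGetD (pvRowL grid yy M) (x + 1) 0
          + PySem.List.pyGetD cur x 0 - PySem.List.pyGetD (pvRowL grid yy M) x 0]) [0]
    = (List.range (k + 1)).map (fun x => pvS grid (yy + 1) x) := by
  intro k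
  induction k with
  | zero =>
    intro _
    simp [PySem.List.pyRange_one_eq_nil (by omega : (0:Int) ≤ 0), pvS, Finset.sum_range_succ]
  | succ k ih =>
    intro hk
    have hcast : ((k + 1 : Nat) : Int) = (k : Int) + 1 := by push_cast; ring
    rw [hcast, PySem.List.pyRange_one_succ_right (by positivity), List.foldl_append,
      ih (by omega)]
    simp only [List.foldl_cons, List.foldl_nil]
    rw [PySem.List.pyGetD_natCast, show ((k : Int) + 1) = ((k + 1 : Nat) : Int) from hcast.symm,
      PySem.List.pyGetD_natCast, PySem.List.pyGetD_natCast, PySem.List.pyGetD_natCast]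
    unfold pvRowL
    rw [PySem.List.getD_map_range (fun x => pvS grid yy x) (M + 1) (k + 1) 0 (by omega),
      PySem.List.getD_map_range (fun x => pvS grid (yy + 1) x) (k + 1) k 0 (by omega),
      PySem.List.getD_map_range (fun x => pvS grid yy x) (M + 1) k 0 (by omega)]
    have helem : pvS grid (yy + 1) (k + 1)
        = (grid.getD yy []).getD k 0 + pvS grid yy (k + 1) + pvS grid (yy + 1) k - pvS grid yy k := by
      rw [pvS_succ_row, pvS_succ_row, Finset.sum_range_succ]
      unfold pvG
      ring
    conv_rhs => rw [List.range_succ, List.map_append]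
    congr 1
    simp [helem]

-- invariant of Source B's outer loop: after k rows the state is the first k+1 table rows
lemma pvSAT_inv (grid : List (List Int)) (M : Nat) :
    ∀ k : Nat, k ≤ M →
    (PySem.List.pyRange 0 (k : Int) 1).foldl
      (fun (st : List (List Int) × List Int) y =>
        let cur := pvSATRow (PySem.List.pyGetD grid y []) st.2 (M : Int)
        (st.1 ++ [cur], cur))
      ([List.replicate (M + 1) 0], List.replicate (M + 1) 0)
    = ((List.range (k + 1)).map (fun y => pvRowL grid y M), pvRowL grid k M) := by
  intro k
  induction k with
  | zero =>
    intro _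
    simp [PySem.List.pyRange_one_eq_nil (by omega : (0:Int) ≤ 0), pvRowL_zero]
  | succ k ih =>
    intro hk
    have hcast : ((k + 1 : Nat) : Int) = (k : Int) + 1 := by push_cast; ring
    rw [hcast, PySem.List.pyRange_one_succ_right (by positivity), List.foldl_append,
      ih (by omega)]
    simp only [List.foldl_cons, List.foldl_nil]
    have hrow : pvSATRow (PySem.List.pyGetD grid (k : Int) []) (pvRowL grid k M) (M : Int)
        = pvRowL grid (k + 1) M := by
      rw [PySem.List.pyGetD_natCast]
      unfold pvSATRow
      exact pvSATRow_inv grid M k M le_rfl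
    rw [hrow]
    conv_rhs => rw [List.range_succ]
    simp

lemma pvSAT_eq (grid : List (List Int)) (M : Nat) :
    pvSAT grid (M : Int) = (List.range (M + 1)).map (fun y => pvRowL grid y M) := by
  unfold pvSAT
  have hinit : ((M : Int) + 1).toNat = M + 1 := by omega
  rw [hinit, pvSAT_inv grid M M le_rfl]

-- telescoping identity: a size×size window sum from the four corner prefix sums
lemma pv_window_eq (grid : List (List Int)) (a b s : Nat) :
    ∑ j ∈ Finset.range s, ∑ i ∈ Finset.range s, pvG grid (a + j) (b + i)
    = pvS grid (a + s) (b + s) - pvS grid a (b + s) - pvS grid (a + s) b + pvS grid a b := by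
  simp only [pvS, Finset.sum_range_add, Finset.sum_add_distrib]
  ring

-- A's innermost double fold computes the window sum
lemma pvA_entry (grid : List (List Int)) (s a b : Nat) :
    (PySem.List.pyRange 0 (s : Int) 1).foldl (fun totalPower yincement =>
      (PySem.List.pyRange 0 (s : Int) 1).foldl (fun totalPower xincement =>
        totalPower + PySem.List.pyGetD (PySem.List.pyGetD grid ((a : Int) + yincement) [])
          ((b : Int) + xincement) 0) totalPower) 0
    = ∑ j ∈ Finset.range s, ∑ i ∈ Finset.range s, pvG grid (a + j) (b + i) := by
  rw [PySem.List.pyRange_one]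
  simp only [sub_zero, Int.toNat_natCast, List.foldl_map, zero_add]
  have hinner : ∀ (j : Nat) (tp : Int),
      (List.range s).foldl (fun tp2 (i : Nat) =>
        tp2 + PySem.List.pyGetD (PySem.List.pyGetD grid ((a : Int) + (j : Int)) [])
          ((b : Int) + (i : Int)) 0) tp
      = tp + ∑ i ∈ Finset.range s, pvG grid (a + j) (b + i) := by
    intro j tp
    rw [PySem.List.foldl_add]
    congr 1
    rw [pv_list_sum_range]
    refine Finset.sum_congr rfl fun i _ => ?_
    rw [show (a : Int) + (j : Int) = ((a + j : Nat) : Int) by push_cast; ring,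
      show (b : Int) + (i : Int) = ((b + i : Nat) : Int) by push_cast; ring,
      PySem.List.pyGetD_natCast, PySem.List.pyGetD_natCast]
    rfl
  simp only [hinner]
  rw [PySem.List.foldl_add, pv_list_sum_range, zero_add]

-- reading the ideal table (width/height 300) at an in-range corner
lemma pvP_get (grid : List (List Int)) (u v : Nat) (hu : u ≤ 299) (hv : v ≤ 299) :
    PySem.List.pyGetD (PySem.List.pyGetD ((List.range 300).map (fun y => pvRowL grid y 299))
      ((u : Nat) : Int) []) ((v : Nat) : Int) 0 = pvS grid u v := by
  rw [PySem.List.pyGetD_natCast, PySem.List.pyGetD_natCast,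
    PySem.List.getD_map_range _ _ _ _ (by omega)]
  unfold pvRowL
  rw [PySem.List.getD_map_range _ _ _ _ (by omega)]

-- main equivalence (the two ports agree on every input)
lemma pv_main (grid : List (List Int)) (size : Int) :
    computeTotalPower grid size = computeTotalPower_alt grid size := by
  by_cases h300 : 300 ≤ size
  · unfold computeTotalPower computeTotalPower_alt
    rw [PySem.List.pyRange_one_eq_nil (by omega : 300 - size ≤ 0)]
    simp [show 300 - size ≤ 0 by omega]
  by_cases hs : size ≤ 0
  · -- empty windows: A's innermost ranges are empty, B returns rows of zeros
    unfold computeTotalPower computeTotalPower_alt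
    rw [if_neg (by omega), if_pos hs, PySem.List.pyRange_one_eq_nil hs]
    rw [PySem.List.foldl_append_singleton_eq_map, List.nil_append]
    refine List.map_congr_left fun y _ => ?_
    rw [PySem.List.foldl_append_singleton_eq_map, List.nil_append]
    simp only [List.foldl_nil]
    rw [List.map_const', PySem.List.length_pyRange_one]
    simp
  · -- 1 ≤ size ≤ 299
    have hs : 1 ≤ size := by omega
    obtain ⟨s, rfl⟩ : ∃ s : Nat, size = (s : Int) := ⟨size.toNat, by omega⟩
    have hs1 : 1 ≤ s := by omega
    have hs2 : s ≤ 299 := by omega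
    unfold computeTotalPower computeTotalPower_alt
    rw [if_neg (by omega), if_neg (by omega : ¬(s : Int) ≤ 0)]
    have hm : 300 - (s : Int) + (s : Int) - 1 = ((299 : Nat) : Int) := by push_cast; ring
    simp only [hm, pvSAT_eq grid 299]
    rw [PySem.List.foldl_append_singleton_eq_map, List.nil_append]
    refine List.map_congr_left fun y hy => ?_
    rw [PySem.List.foldl_append_singleton_eq_map, List.nil_append]
    refine List.map_congr_left fun x hx => ?_
    rw [PySem.List.mem_pyRange_one] at hy hx
    obtain ⟨a, rfl⟩ : ∃ a : Nat, y = (a : Int) := ⟨y.toNat, by omega⟩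
    obtain ⟨b, rfl⟩ : ∃ b : Nat, x = (b : Int) := ⟨x.toNat, by omega⟩
    have ha : a + s ≤ 299 := by omega
    have hb : b + s ≤ 299 := by omega
    rw [pvA_entry grid s a b, pv_window_eq grid a b s]
    rw [show (a : Int) + (s : Int) = ((a + s : Nat) : Int) by push_cast; ring,
      show (b : Int) + (s : Int) = ((b + s : Nat) : Int) by push_cast; ring]
    rw [pvP_get grid (a + s) (b + s) ha hb, pvP_get grid a (b + s) (by omega) hb,
      pvP_get grid (a + s) b ha (by omega), pvP_get grid a b (by omega) (by omega)]

-- ===== VERDICT (by name: the statement is the Claim_ definition above) =====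
theorem computeTotalPower_spec : Claim_equal_computeTotalPower := by
  intro grid size _ _
  exact pv_main grid size
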